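-- pv_equiv track=rewrite | github.com/wiserlake0996/text-extract-py | py.py | extractWIN
-- ===== SOURCE A (Python) =====
-- def extractWIN(win_extract):
--
--     win_split_by_error = []
--     win_string = ""
--
--     #Check for header keywords on each line to identify start of error
--     for w in range(len(win_extract)):
--         if("problem:" in win_extract[w].lower() or "bug:" in win_extract[w].lower() or "glitch:" in win_extract[w].lower() or "annoying:" in win_extract[w].lower()):
--
--             win_string += win_extract[w] + "\n"
--
--             for w2 in range(w+1, len(win_extract)):
--                 if w2 == len(win_extract):
--                     win_split_by_error.append(win_string)
--                     break
--
--                 if("problem:" in win_extract[w2].lower() or "bug:" in win_extract[w2].lower() or "glitch:" in win_extract[w2].lower() or "annoying:" in win_extract[w2].lower()):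
--
--                     win_split_by_error.append(win_string)
--                     w= w2 - 1
--                     win_string = ""
--                     break
--
--                 win_string += win_extract[w2] + "\n"
--
--     return win_split_by_error
-- ===== SOURCE B (Python) =====
-- def extractWIN(win_extract):
--     def is_header(line):
--         s = line.lower()
--         return any(k in s for k in ("problem:", "bug:", "glitch:", "annoying:"))
--
--     idx = [i for i, line in enumerate(win_extract) if is_header(line)]
--     return ["".join(line + "\n" for line in win_extract[a:b])
--             for a, b in zip(idx, idx[1:])]
-- ===== Notes on version B (the rewrite author's own statement) =====
-- stated objective: simpler
-- what changed: B replaces A's nested index loops with leftover string state by one pass collecting header-line indices and a comprehension joining each consecutive index pair's slice.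
import Mathlib
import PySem

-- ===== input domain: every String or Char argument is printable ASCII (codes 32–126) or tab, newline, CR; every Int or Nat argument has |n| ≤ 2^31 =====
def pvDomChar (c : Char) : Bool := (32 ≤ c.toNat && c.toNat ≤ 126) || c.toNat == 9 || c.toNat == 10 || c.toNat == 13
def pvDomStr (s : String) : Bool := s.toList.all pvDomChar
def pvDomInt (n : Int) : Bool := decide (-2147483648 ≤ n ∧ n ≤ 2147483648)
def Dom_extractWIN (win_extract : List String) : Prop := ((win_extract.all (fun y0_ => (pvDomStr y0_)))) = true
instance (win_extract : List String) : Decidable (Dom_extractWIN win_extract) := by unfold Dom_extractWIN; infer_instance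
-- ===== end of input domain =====

-- B replaces A's nested index loops (with carried leftover string state) by one pass
-- collecting header-line indices and a join over each consecutive index pair's slice (objective: simpler).


-- ===== PORT A =====
-- the four-keyword header test, '.lower()' recomputed per membership test as in A's source
def pvHdrA (s : String) : Bool :=
  PySem.Str.isIn "problem:" (PySem.Str.lower s) || PySem.Str.isIn "bug:" (PySem.Str.lower s) ||
    PySem.Str.isIn "glitch:" (PySem.Str.lower s) || PySem.Str.isIn "annoying:" (PySem.Str.lower s)

-- inner 'for w2 in range(w+1, len)' loop; indices stay in range so xs[w2] is xs.getD w2 "" exactly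
-- (the 'w2 == len' branch of A is transcribed although range(w+1, len) never reaches len)
def pvInnerA (xs : List String) (n : Nat) (w2 : Nat) (res : List String) (str : String) :
    List String × String :=
  if w2 < n then
    if w2 = n then (res ++ [str], str)
    else if pvHdrA (xs.getD w2 "") then (res ++ [str], "")
    else pvInnerA xs n (w2 + 1) res (str ++ xs.getD w2 "" ++ "\n")
  else (res, str)
termination_by n - w2

-- outer 'for w in range(len)' loop; 'w = w2 - 1' in A has no effect on a Python for-loop variable
def pvOuterA (xs : List String) (n : Nat) (w : Nat) (res : List String) (str : String) :
    List String :=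
  if w < n then
    if pvHdrA (xs.getD w "") then
      let p := pvInnerA xs n (w + 1) res (str ++ xs.getD w "" ++ "\n")
      pvOuterA xs n (w + 1) p.1 p.2
    else pvOuterA xs n (w + 1) res str
  else res
termination_by n - w

def extractWIN (win_extract : List String) : List String :=
  pvOuterA win_extract win_extract.length 0 [] ""

-- ===== PORT B =====
def pvIsHeader (line : String) : Bool :=
  let s := PySem.Str.lower line
  ["problem:", "bug:", "glitch:", "annoying:"].any (fun k => PySem.Str.isIn k s)

def extractWIN_alt (win_extract : List String) : List String :=
  let idx := ((PySem.List.enumerate win_extract).filter (fun p => pvIsHeader p.2)).map (fun p => p.1)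
  (idx.zip idx.tail).map (fun p =>
    (PySem.List.slice win_extract (some p.1) (some p.2)).foldl (fun acc line => acc ++ line ++ "\n") "")

-- ===== PRECONDITION & SPEC =====
def Spec_extractWIN (win_extract : List String) (out : List String) : Prop := out = extractWIN_alt win_extract
instance (win_extract : List String) (out : List String) : Decidable (Spec_extractWIN win_extract out) := by unfold Spec_extractWIN; infer_instance

-- ===== CLAIM (what is proved, stated in full; the proofs are below) =====
def Claim_equal_extractWIN : Prop := ∀ (win_extract : List String), Dom_extractWIN win_extract → Spec_extractWIN win_extract (extractWIN win_extract)

-- ===== LEMMAS AND PROOFS =====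

theorem pvHdr_eq (s : String) : pvHdrA s = pvIsHeader s := by
  simp [pvHdrA, pvIsHeader, Bool.or_assoc]

-- the increasing list of header indices in [w, n)
def pvHFrom (xs : List String) (n : Nat) (w : Nat) : List Nat :=
  if w < n then (if pvHdrA (xs.getD w "") then [w] else []) ++ pvHFrom xs n (w + 1) else []
termination_by n - w

theorem pvHFrom_eq_filter (xs : List String) (n w : Nat) :
    pvHFrom xs n w = (List.range' w (n - w)).filter (fun i => pvHdrA (xs.getD i "")) := by
  rw [pvHFrom]
  split
  · next h =>
    have hn : n - w = (n - (w + 1)) + 1 := by omega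
    rw [hn, List.range'_succ, List.filter_cons, pvHFrom_eq_filter xs n (w + 1)]
    split <;> simp
  · next h =>
    have hn : n - w = 0 := by omega
    simp [hn]
termination_by n - w

theorem pvHFrom_nil_inv (xs : List String) (n w : Nat) (h : pvHFrom xs n w = [])
    (i : Nat) (hwi : w ≤ i) (hin : i < n) : pvHdrA (xs.getD i "") = false := by
  rw [pvHFrom] at h
  by_cases hw : w < n
  · rw [if_pos hw] at h
    by_cases hh : pvHdrA (xs.getD w "") = true
    · rw [if_pos hh] at h; simp at h
    · rw [if_neg hh] at h
      simp only [List.nil_append] at h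
      by_cases hi : i = w
      · subst hi; simpa using hh
      · exact pvHFrom_nil_inv xs n (w + 1) h i (by omega) hin
  · omega
termination_by n - w

theorem pvHFrom_cons_inv (xs : List String) (n w : Nat) (b : Nat) (rest : List Nat)
    (h : pvHFrom xs n w = b :: rest) :
    w ≤ b ∧ b < n ∧ pvHdrA (xs.getD b "") = true ∧
      ∀ i, w ≤ i → i < b → pvHdrA (xs.getD i "") = false := by
  rw [pvHFrom] at h
  by_cases hw : w < n
  · simp only [if_pos hw] at h
    by_cases hh : pvHdrA (xs.getD w "")
    · rw [if_pos hh] at h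
      simp only [List.cons_append, List.nil_append, List.cons.injEq] at h
      obtain ⟨hb, _⟩ := h
      subst hb
      exact ⟨le_refl _, hw, hh, fun i hi hib => by omega⟩
    · rw [if_neg hh] at h
      simp only [List.nil_append] at h
      obtain ⟨h1, h2, h3, h4⟩ := pvHFrom_cons_inv xs n (w + 1) b rest h
      refine ⟨by omega, h2, h3, fun i hi hib => ?_⟩
      by_cases hiw : i = w
      · subst hiw; simpa using hh
      · exact h4 i (by omega) hib
  · rw [if_neg hw] at h; exact absurd h (by simp)
termination_by n - w

-- with no header at or after w, the outer loop only carries state and returns res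
theorem pvOuterA_no_hdr (xs : List String) (n w : Nat) (res : List String) (str : String)
    (h : ∀ i, w ≤ i → i < n → pvHdrA (xs.getD i "") = false) :
    pvOuterA xs n w res str = res := by
  rw [pvOuterA]
  by_cases hw : w < n
  · rw [if_pos hw, if_neg (by rw [h w (le_refl _) hw]; simp)]
    exact pvOuterA_no_hdr xs n (w + 1) res str (fun i hi hin => h i (by omega) hin)
  · rw [if_neg hw]
termination_by n - w

-- with no header at or after w2, the inner loop never appends
theorem pvInnerA_no_hdr (xs : List String) (n w2 : Nat) (res : List String) (str : String)
    (h : ∀ i, w2 ≤ i → i < n → pvHdrA (xs.getD i "") = false) :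
    (pvInnerA xs n w2 res str).1 = res := by
  rw [pvInnerA]
  by_cases hw : w2 < n
  · rw [if_pos hw, if_neg (by omega), if_neg (by rw [h w2 (le_refl _) hw]; simp)]
    exact pvInnerA_no_hdr xs n (w2 + 1) res _ (fun i hi hin => h i (by omega) hin)
  · rw [if_neg hw]
termination_by n - w2

-- the inner loop up to the next header b appends str extended by the lines of xs[w2:b]
theorem pvInnerA_to_hdr (xs : List String) (n w2 b : Nat) (res : List String) (str : String)
    (hn : n = xs.length) (hwb : w2 ≤ b) (hbn : b < n) (hb : pvHdrA (xs.getD b "") = true)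
    (hmid : ∀ i, w2 ≤ i → i < b → pvHdrA (xs.getD i "") = false) :
    pvInnerA xs n w2 res str =
      (res ++ [((xs.drop w2).take (b - w2)).foldl (fun acc line => acc ++ line ++ "\n") str], "") := by
  rw [pvInnerA]
  by_cases hwb' : w2 = b
  · subst hwb'
    rw [if_pos (by omega), if_neg (by omega), if_pos hb]
    simp
  · have hw : w2 < n := by omega
    rw [if_pos hw, if_neg (by omega), if_neg (by rw [hmid w2 (le_refl _) (by omega)]; simp)]
    rw [pvInnerA_to_hdr xs n (w2 + 1) b res _ hn (by omega) hbn hb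
      (fun i hi hib => hmid i (by omega) hib)]
    have hlt : w2 < xs.length := by omega
    have hdrop : xs.drop w2 = xs[w2] :: xs.drop (w2 + 1) := List.drop_eq_getElem_cons hlt
    have htk : b - w2 = (b - (w2 + 1)) + 1 := by omega
    rw [hdrop, htk, List.take_succ_cons, List.foldl_cons, List.getD_eq_getElem xs "" hlt]
termination_by b - w2

-- main loop invariant: from index w with empty carried string, the outer loop appends
-- one joined segment per consecutive pair of header indices ≥ w
theorem pvOuterA_eq (xs : List String) (n w : Nat) (res : List String) (hn : n = xs.length) :
    pvOuterA xs n w res "" =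
      res ++ ((pvHFrom xs n w).zip (pvHFrom xs n w).tail).map (fun p =>
        ((xs.drop p.1).take (p.2 - p.1)).foldl (fun acc line => acc ++ line ++ "\n") "") := by
  rw [pvOuterA]
  by_cases hw : w < n
  · rw [if_pos hw]
    by_cases hh : pvHdrA (xs.getD w "")
    · rw [if_pos hh]
      match hrec : pvHFrom xs n (w + 1) with
      | [] =>
        have hno := pvHFrom_nil_inv xs n (w + 1) hrec
        have h1 : (pvInnerA xs n (w + 1) res ("" ++ xs.getD w "" ++ "\n")).1 = res :=
          pvInnerA_no_hdr xs n (w + 1) res _ hno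
        rw [pvOuterA_no_hdr xs n (w + 1) _ _ (fun i hi hin => hno i hi hin), h1]
        have hfw : pvHFrom xs n w = [w] := by
          rw [pvHFrom, if_pos hw, if_pos hh, hrec]; rfl
        simp [hfw]
      | b :: rest =>
        obtain ⟨hwb, hbn, hb, hmid⟩ := pvHFrom_cons_inv xs n (w + 1) b rest hrec
        rw [pvInnerA_to_hdr xs n (w + 1) b res _ hn hwb hbn hb hmid]
        rw [pvOuterA_eq xs n (w + 1) _ hn]
        have hfw : pvHFrom xs n w = w :: b :: rest := by
          rw [pvHFrom, if_pos hw, if_pos hh, hrec]; rfl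
        have hlt : w < xs.length := by omega
        have hdrop : xs.drop w = xs[w] :: xs.drop (w + 1) := List.drop_eq_getElem_cons hlt
        have htk : b - w = (b - (w + 1)) + 1 := by omega
        rw [hfw, hrec]
        simp only [List.tail_cons, List.zip_cons_cons, List.map_cons, List.append_assoc,
          List.singleton_append]
        rw [hdrop, htk, List.take_succ_cons, List.foldl_cons, List.getD_eq_getElem xs "" hlt]
    · rw [if_neg hh, pvOuterA_eq xs n (w + 1) res hn]
      have hfw : pvHFrom xs n w = pvHFrom xs n (w + 1) := by
        rw [pvHFrom, if_pos hw, if_neg hh, List.nil_append]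
      rw [hfw]
  · rw [if_neg hw]
    have hfw : pvHFrom xs n w = [] := by rw [pvHFrom, if_neg hw]
    simp [hfw]
termination_by n - w

-- B's index list is the cast of the header-index list from 0
theorem extractWIN_alt_eq (xs : List String) :
    extractWIN_alt xs =
      (((List.range xs.length).filter (fun i => pvIsHeader (xs.getD i ""))).zip
        ((List.range xs.length).filter (fun i => pvIsHeader (xs.getD i ""))).tail).map (fun p =>
        ((xs.drop p.1).take (p.2 - p.1)).foldl (fun acc line => acc ++ line ++ "\n") "") := by
  unfold extractWIN_alt
  have he : PySem.List.enumerate xs =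
      List.map (fun j => (j, PySem.List.pyGetD xs j "")) (PySem.List.pyRange 0 (PySem.List.len xs)) :=
    PySem.List.enumerate_eq_map_pyRange xs ""
  have hr : PySem.List.pyRange 0 (PySem.List.len xs) = (List.range xs.length).map Nat.cast := by
    simpa [PySem.List.len] using PySem.List.pyRange_zero_natCast xs.length
  simp only [he, hr, List.filter_map, List.map_map]
  have hcomp : ((fun p : Int × String => pvIsHeader p.2) ∘
      (fun j : Int => (j, PySem.List.pyGetD xs j "")) ∘ (Nat.cast : Nat → Int)) =
      fun i : Nat => pvIsHeader (xs.getD i "") := by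
    funext i
    simp [Function.comp, PySem.List.pyGetD_natCast]
  rw [hcomp]
  set l := (List.range xs.length).filter (fun i => pvIsHeader (xs.getD i "")) with hl
  have hmap : (l.map ((fun p : Int × String => p.1) ∘
      (fun j : Int => (j, PySem.List.pyGetD xs j "")) ∘ (Nat.cast : Nat → Int))) =
      l.map (Nat.cast : Nat → Int) := by
    apply List.map_congr_left; intro a _; rfl
  rw [hmap, ← List.map_tail, List.zip_map, List.map_map]
  apply List.map_congr_left
  rintro ⟨a, b⟩ _
  simp [Function.comp, PySem.List.slice_natCast]

-- ===== VERDICT (by name: the statement is the Claim_ definition above) =====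
theorem extractWIN_spec : Claim_equal_extractWIN := by
  intro xs _
  unfold Spec_extractWIN extractWIN
  rw [pvOuterA_eq xs xs.length 0 [] rfl, extractWIN_alt_eq]
  rw [pvHFrom_eq_filter]
  rw [Nat.sub_zero, ← List.range_eq_range']
  have hfilter : (List.range xs.length).filter (fun i => pvHdrA (xs.getD i "")) =
      (List.range xs.length).filter (fun i => pvIsHeader (xs.getD i "")) :=
    List.filter_congr (fun i _ => by rw [pvHdr_eq])
  rw [hfilter, List.nil_append]
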